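-- pv_equiv track=rewrite | github.com/Nacriema/Leet-Code | daily_challenges/minimum-amount-of-time-to-collect-garbage.py | garbageCollection_SLOW
-- ===== SOURCE A (Python) =====
-- from typing import List
-- from collections import defaultdict, Counter
--
-- def garbageCollection_SLOW(garbage: List[str], travel: List[int]) -> int:
--     last_dict = defaultdict(lambda: -1)
--     for i, g in enumerate(garbage[::-1]):
--         for item in ["G", "P", "M"]:
--             if last_dict[item] == -1 and item in g:
--                 last_dict[item] = len(garbage) - 1 - i
--     # Again, looping time for each truck anc calculate the time
--     total_time = 0
--
--     for item in ["G", "P", "M"]: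
--         last = last_dict[item]
--         if last == -1:
--             continue
--         else:
--             for i in range(0, last + 1):
--                 if i > 0: total_time += travel[i - 1]
--                 freq = Counter(garbage[i])
--                 if item in freq.keys():
--                     total_time += freq[item]
--     return total_time
-- ===== SOURCE B (Python) =====
-- from typing import List
--
-- def garbageCollection_SLOW(garbage: List[str], travel: List[int]) -> int:
--     # One forward pass: count every piece of garbage and remember the last house
--     # of each type; then add the travel prefix up to each type's last house.
--     pick = 0
--     last = {"G": -1, "P": -1, "M": -1}
--     for i, g in enumerate(garbage):
--         for ch in g:
--             if ch in last:
--                 pick += 1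
--                 last[ch] = i
--     total = pick
--     for ch in "GPM":
--         if last[ch] >= 0:
--             total += sum(travel[:last[ch]])
--     return total
-- ===== Notes on version B (the rewrite author's own statement) =====
-- stated objective: alternative
-- what changed: Replaces A's reversed scan for last indices plus, per garbage type, a rescan of the prefix that rebuilds a Counter for every house, by one forward pass that counts all pickups and records each type's last house, finishing with three travel prefix sums.
import Mathlib
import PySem

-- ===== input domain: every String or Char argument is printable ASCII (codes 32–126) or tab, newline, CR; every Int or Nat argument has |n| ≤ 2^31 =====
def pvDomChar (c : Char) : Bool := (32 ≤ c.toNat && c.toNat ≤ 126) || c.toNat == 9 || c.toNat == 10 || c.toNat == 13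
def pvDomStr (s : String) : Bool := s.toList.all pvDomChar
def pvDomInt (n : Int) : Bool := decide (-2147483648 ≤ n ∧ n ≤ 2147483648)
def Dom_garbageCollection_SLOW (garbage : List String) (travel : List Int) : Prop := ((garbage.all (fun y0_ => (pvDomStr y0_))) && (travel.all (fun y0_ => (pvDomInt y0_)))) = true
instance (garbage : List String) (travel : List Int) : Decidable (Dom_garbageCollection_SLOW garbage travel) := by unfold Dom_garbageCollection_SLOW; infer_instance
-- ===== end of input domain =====

-- B replaces A's reversed scan + per-type prefix rescans with Counter rebuilds by one
-- forward counting pass plus three travel prefix sums (objective: alternative single-pass structure).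

-- ===== PORT A =====
-- the list ["G", "P", "M"] A iterates; membership of a 1-char string in g is char membership
def gcItemsA : List Char := ['G', 'P', 'M']

-- body of A's first loop: one enumerate step over the reversed list
def aScanStep (garbage : List String) (d : PySem.Dict Char Int) (p : Int × String) : PySem.Dict Char Int :=
  gcItemsA.foldl
    (fun d item =>
      if d.getD item (-1) = -1 && p.2.toList.contains item then
        d.insert item ((garbage.length : Int) - 1 - p.1)
      else d) d

-- A's last_dict (defaultdict read back with default -1)
def aLastDict (garbage : List String) : PySem.Dict Char Int :=
  (PySem.List.enumerate garbage.reverse 0).foldl (aScanStep garbage) PySem.Dict.empty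

-- body of A's inner range loop for one truck `item`
def aTimeStep (garbage : List String) (travel : List Int) (item : Char) (total i : Int) : Int :=
  let total := if 0 < i then total + PySem.List.pyGetD travel (i - 1) 0 else total
  let freq := PySem.Dict.counter (PySem.List.pyGetD garbage i "").toList
  if freq.contains item then total + freq.getD item 0 else total

-- one iteration of A's second loop over ["G", "P", "M"]
def aItemTime (garbage : List String) (travel : List Int) (total : Int) (item : Char) : Int :=
  let last := (aLastDict garbage).getD item (-1)
  if last = -1 then total
  else (PySem.List.pyRange 0 (last + 1) 1).foldl (aTimeStep garbage travel item) total

def garbageCollection_SLOW (garbage : List String) (travel : List Int) : Int :=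
  gcItemsA.foldl (aItemTime garbage travel) 0

-- ===== PORT B =====
-- body of Source B's inner loop `for ch in g`
def bCharStep (i : Int) (st : Int × PySem.Dict Char Int) (ch : Char) : Int × PySem.Dict Char Int :=
  if st.2.contains ch then (st.1 + 1, st.2.insert ch i) else st

-- body of Source B's single forward pass `for i, g in enumerate(garbage)`
def bHouseStep (st : Int × PySem.Dict Char Int) (p : Int × String) : Int × PySem.Dict Char Int :=
  p.2.toList.foldl (bCharStep p.1) st

-- the pass itself: (pick, last)
def bScan (garbage : List String) : Int × PySem.Dict Char Int :=
  (PySem.List.enumerate garbage 0).foldl bHouseStep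
    (0, PySem.Dict.ofList [('G', -1), ('P', -1), ('M', -1)])

def garbageCollection_SLOW_alt (garbage : List String) (travel : List Int) : Int :=
  let st := bScan garbage
  -- the string "GPM" Source B iterates, as its list of chars
  (['G', 'P', 'M'] : List Char).foldl
    (fun total ch =>
      let l := st.2.getD ch (-1)
      if 0 ≤ l then total + (PySem.List.slice travel none (some l)).sum else total)
    st.1

-- ===== PRECONDITION & SPEC =====
-- Pre_ excludes exactly the inputs where A raises IndexError: a house containing garbage
-- at an index beyond len(travel) makes A read travel past its end.
def Pre_garbageCollection_SLOW (garbage : List String) (travel : List Int) : Prop :=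
  ∀ i ∈ List.range garbage.length,
    ('G' ∈ (garbage.getD i "").toList ∨ 'P' ∈ (garbage.getD i "").toList ∨ 'M' ∈ (garbage.getD i "").toList) →
      i ≤ travel.length

instance (garbage : List String) (travel : List Int) : Decidable (Pre_garbageCollection_SLOW garbage travel) := by
  unfold Pre_garbageCollection_SLOW; infer_instance

def pvWitness_garbageCollection_SLOW : List String × List Int := (["G"], [])

def Spec_garbageCollection_SLOW (garbage : List String) (travel : List Int) (out : Int) : Prop := out = garbageCollection_SLOW_alt garbage travel
instance (garbage : List String) (travel : List Int) (out : Int) : Decidable (Spec_garbageCollection_SLOW garbage travel out) := by unfold Spec_garbageCollection_SLOW; infer_instance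

-- ===== CLAIM (what is proved, stated in full; the proofs are below) =====
def Claim_equal_garbageCollection_SLOW : Prop := ∀ (garbage : List String) (travel : List Int), Dom_garbageCollection_SLOW garbage travel → Pre_garbageCollection_SLOW garbage travel → Spec_garbageCollection_SLOW garbage travel (garbageCollection_SLOW garbage travel)

-- ===== LEMMAS AND PROOFS =====

-- last index of a house containing c, or -1
def gpmLast (gs : List String) (c : Char) : Int :=
  match gs.reverse.findIdx? (fun g => g.toList.contains c) with
  | none => -1
  | some j => (gs.length : Int) - 1 - (j : Int)

-- total number of occurrences of c over all houses
def cntC (gs : List String) (c : Char) : Int :=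
  (gs.map (fun g => (g.toList.count c : Int))).sum

theorem gpmLast_snoc (gs : List String) (g : String) (c : Char) :
    gpmLast (gs ++ [g]) c = if g.toList.contains c then (gs.length : Int) else gpmLast gs c := by
  unfold gpmLast
  rw [List.reverse_append, List.reverse_singleton, List.singleton_append, List.findIdx?_cons]
  cases hc : g.toList.contains c with
  | true =>
    simp only [hc, if_true, if_pos]
    simp only [List.length_append, List.length_cons, List.length_nil]
    push_cast; omega
  | false =>
    simp only [hc, Bool.false_eq_true, if_false]
    cases hfind : gs.reverse.findIdx? (fun g => g.toList.contains c) with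
    | none => simp
    | some j =>
      have hj : j < gs.length := by
        have := (List.findIdx?_eq_some_iff_getElem.mp hfind).1
        simpa using this
      simp only [Option.map_some, List.length_append, List.length_cons, List.length_nil]
      push_cast; omega

theorem neg_one_le_gpmLast (gs : List String) (c : Char) : -1 ≤ gpmLast gs c := by
  unfold gpmLast
  cases hfind : gs.reverse.findIdx? (fun g => g.toList.contains c) with
  | none => simp
  | some j =>
    have hj : j < gs.length := by
      have := (List.findIdx?_eq_some_iff_getElem.mp hfind).1
      simpa using this
    simp only; omega

theorem cntC_eq_zero (gs : List String) (c : Char) (h : gpmLast gs c = -1) : cntC gs c = 0 := by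
  unfold gpmLast at h
  cases hfind : gs.reverse.findIdx? (fun g => g.toList.contains c) with
  | some j =>
    rw [hfind] at h
    have hj : j < gs.length := by
      have := (List.findIdx?_eq_some_iff_getElem.mp hfind).1
      simpa using this
    simp only at h; omega
  | none =>
    have hall := List.findIdx?_eq_none_iff.mp hfind
    unfold cntC
    apply List.sum_eq_zero
    intro x hx
    obtain ⟨g, hg, rfl⟩ := List.mem_map.mp hx
    have := hall g (List.mem_reverse.mpr hg)
    simp only [List.contains_eq_mem, decide_eq_false_iff_not] at this
    simp [List.count_eq_zero.mpr this]

-- the found index really contains c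
theorem gpmLast_mem (gs : List String) (c : Char) (h : 0 ≤ gpmLast gs c) :
    ∃ hh : (gpmLast gs c).toNat < gs.length, c ∈ gs[(gpmLast gs c).toNat].toList := by
  unfold gpmLast at *
  cases hfind : gs.reverse.findIdx? (fun g => g.toList.contains c) with
  | none => rw [hfind] at h; simp at h
  | some j =>
    obtain ⟨hj, hp, -⟩ := List.findIdx?_eq_some_iff_getElem.mp hfind
    simp only at h ⊢
    have hj' : j < gs.length := by simpa using hj
    have hidx : ((gs.length : Int) - 1 - (j : Int)).toNat = gs.length - 1 - j := by omega
    refine ⟨by omega, ?_⟩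
    rw [List.getElem_reverse] at hp
    simp only [List.contains_eq_mem, decide_eq_true_eq] at hp
    simp only [hidx]
    exact hp

-- every house containing c is at an index at most gpmLast
theorem le_gpmLast (gs : List String) (c : Char) (i : Nat) (hi : i < gs.length)
    (hci : c ∈ gs[i].toList) : (i : Int) ≤ gpmLast gs c := by
  unfold gpmLast
  cases hfind : gs.reverse.findIdx? (fun g => g.toList.contains c) with
  | none =>
    have hall := List.findIdx?_eq_none_iff.mp hfind
    have := hall gs[i] (List.mem_reverse.mpr (List.getElem_mem hi))
    simp only [List.contains_eq_mem, decide_eq_false_iff_not] at this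
    exact absurd hci this
  | some j =>
    obtain ⟨hj, -, hbefore⟩ := List.findIdx?_eq_some_iff_getElem.mp hfind
    have hj' : j < gs.length := by simpa using hj
    simp only
    by_contra hcon
    push_neg at hcon
    have hlt : gs.length - 1 - i < j := by omega
    have h2 := hbefore _ hlt
    rw [List.getElem_reverse] at h2
    simp only [show gs.length - 1 - (gs.length - 1 - i) = i from by omega] at h2
    simp only [List.contains_eq_mem, decide_eq_true_eq] at h2
    exact h2 hci

-- no occurrence of c after the last index
theorem gpmLast_drop (gs : List String) (c : Char) (g : String)
    (hg : g ∈ gs.drop ((gpmLast gs c).toNat + 1)) : g.toList.contains c = false := by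
  obtain ⟨k, hk, hgk⟩ := List.mem_iff_getElem.mp hg
  rw [List.getElem_drop] at hgk
  have hk' : (gpmLast gs c).toNat + 1 + k < gs.length := by
    simp only [List.length_drop] at hk; omega
  by_contra hcon
  have hmem : c ∈ gs[(gpmLast gs c).toNat + 1 + k].toList := by
    rw [hgk]
    simpa [List.contains_eq_mem] using hcon
  have := le_gpmLast gs c _ hk' hmem
  have hge := neg_one_le_gpmLast gs c
  omega

-- ---------- A side: phase 1 characterisation ----------

theorem A_inner (gs : List String) (i : Int) (g : String) (d : PySem.Dict Char Int) (c : Char)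
    (hc : c ∈ gcItemsA) :
    (aScanStep gs d (i, g)).getD c (-1)
    = if d.getD c (-1) = -1 && g.toList.contains c then (gs.length : Int) - 1 - i else d.getD c (-1) := by
  have hstep : ∀ (d : PySem.Dict Char Int) (k : Char) (v : Int) (cond : Bool) (c' : Char),
      c' ≠ k → (if cond then d.insert k v else d).getD c' (-1) = d.getD c' (-1) := by
    intro d k v cond c' hne
    split
    · exact PySem.Dict.getD_insert_of_ne d _ _ hne
    · rfl
  simp only [gcItemsA, List.mem_cons, List.not_mem_nil, or_false] at hc
  unfold aScanStep
  simp only [gcItemsA, List.foldl_cons, List.foldl_nil]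
  rcases hc with rfl | rfl | rfl
  · rw [hstep _ 'M' _ _ _ (by decide), hstep _ 'P' _ _ _ (by decide)]
    split
    · rw [PySem.Dict.getD_insert_self]
    · rfl
  · rw [hstep _ 'M' _ _ _ (by decide)]
    have hG := hstep d 'G' ((gs.length : Int) - 1 - i)
        (d.getD 'G' (-1) = -1 && g.toList.contains 'G') 'P' (by decide)
    rw [hG]
    split
    · rw [PySem.Dict.getD_insert_self]
    · exact hG
  · have hG := hstep d 'G' ((gs.length : Int) - 1 - i)
        (d.getD 'G' (-1) = -1 && g.toList.contains 'G') 'M' (by decide)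
    set d1 := if d.getD 'G' (-1) = -1 && g.toList.contains 'G'
        then d.insert 'G' ((gs.length : Int) - 1 - i) else d with hd1
    have hP := hstep d1 'P' ((gs.length : Int) - 1 - i)
        (d1.getD 'P' (-1) = -1 && g.toList.contains 'P') 'M' (by decide)
    rw [hP, hG]
    split
    · rw [PySem.Dict.getD_insert_self]
    · exact hP.symm ▸ (hP.trans hG)

-- the value assigned by the first hit in the scan order
def firstHit (n : Int) (l : List (Int × String)) (c : Char) : Int :=
  match l.find? (fun p => p.2.toList.contains c) with
  | none => -1
  | some p => n - 1 - p.1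

theorem A_outer (gs : List String) (l : List (Int × String)) (d : PySem.Dict Char Int) (c : Char)
    (hc : c ∈ gcItemsA) (hb : ∀ p ∈ l, 0 ≤ p.1 ∧ p.1 ≤ (gs.length : Int) - 1) :
    (l.foldl (aScanStep gs) d).getD c (-1)
    = if d.getD c (-1) = -1 then firstHit (gs.length : Int) l c else d.getD c (-1) := by
  induction l generalizing d with
  | nil => simp [firstHit]
  | cons p t ih =>
    rw [List.foldl_cons, ih _ (fun q hq => hb q (List.mem_cons_of_mem _ hq))]
    have hA := A_inner gs p.1 p.2 d c hc
    rw [show ((p.1, p.2) : Int × String) = p from rfl] at hA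
    rw [hA]
    have hp := hb p (List.mem_cons_self)
    unfold firstHit
    rw [List.find?_cons]
    by_cases hcp : c ∈ p.2.toList
    · by_cases hd : d.getD c (-1) = -1
      · have hne : ¬ ((gs.length : Int) - 1 - p.1 = -1) := by omega
        simp [hcp, hd, hne]
      · simp [hcp, hd]
    · simp [hcp]

theorem firstHit_enum (xs : List String) (s n : Int) (c : Char) :
    firstHit n (PySem.List.enumerate xs s) c
    = match xs.findIdx? (fun g => g.toList.contains c) with
      | none => -1
      | some j => n - 1 - (s + (j : Int)) := by
  induction xs generalizing s with
  | nil => simp [firstHit, PySem.List.enumerate]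
  | cons x t ih =>
    rw [PySem.List.enumerate_cons]
    unfold firstHit
    rw [List.find?_cons, List.findIdx?_cons]
    cases hx : x.toList.contains c with
    | true =>
      simp only [hx, if_true, if_pos]
      norm_num
    | false =>
      simp only [hx, Bool.false_eq_true, if_false]
      have hih := ih (s + 1)
      unfold firstHit at hih
      cases hfind : t.findIdx? (fun g => g.toList.contains c) with
      | none =>
        rw [hfind] at hih
        simp only at hih ⊢
        rw [hih]
        simp
      | some j =>
        rw [hfind] at hih
        simp only [Option.map_some] at hih ⊢
        rw [hih]
        push_cast; ring

-- A's phase-1 dict read back at c equals gpmLast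
theorem A_phase1 (gs : List String) (c : Char) (hc : c ∈ gcItemsA) :
    (aLastDict gs).getD c (-1) = gpmLast gs c := by
  unfold aLastDict
  rw [A_outer gs _ _ c hc]
  · rw [PySem.Dict.getD_empty, if_pos rfl, firstHit_enum]
    unfold gpmLast
    cases hfind : gs.reverse.findIdx? (fun g => g.toList.contains c) with
    | none => rfl
    | some j => simp only; push_cast; ring
  · intro p hp
    obtain ⟨k, hk, rfl⟩ := (PySem.List.mem_enumerate_iff _ _ _).mp hp
    rw [List.length_reverse] at hk
    constructor
    · show (0 : Int) ≤ 0 + (k : Int); omega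
    · show 0 + (k : Int) ≤ (gs.length : Int) - 1; omega

-- ---------- A side: phase 2 (the per-item range loop) ----------

theorem A_step_eq (gs : List String) (travel : List Int) (c : Char) (t i : Int) :
    aTimeStep gs travel c t i
    = (if 0 < i then t + PySem.List.pyGetD travel (i - 1) 0 else t)
      + ((PySem.List.pyGetD gs i "").toList.count c : Int) := by
  unfold aTimeStep
  simp only [PySem.Dict.contains_counter, PySem.Dict.getD_counter]
  cases h : (PySem.List.pyGetD gs i "").toList.contains c with
  | true => simp [h]
  | false =>
    have hz : (PySem.List.pyGetD gs i "").toList.count c = 0 := by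
      apply List.count_eq_zero.mpr
      simpa [List.contains_eq_mem] using h
    simp [h, hz]

theorem A_range (gs : List String) (travel : List Int) (c : Char) (L : Nat) (t0 : Int)
    (hL : L < gs.length) (hT : L ≤ travel.length) :
    (PySem.List.pyRange 0 ((L : Int) + 1) 1).foldl (aTimeStep gs travel c) t0
    = t0 + (travel.take L).sum + ((gs.take (L + 1)).map (fun g => (g.toList.count c : Int))).sum := by
  have hcast : ((L : Int) + 1) = ((L + 1 : Nat) : Int) := by push_cast; ring
  rw [hcast, PySem.List.pyRange_zero_natCast, List.foldl_map]
  induction L with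
  | zero =>
    have h1 : List.range (0 + 1) = [0] := by simp
    rw [h1, List.foldl_cons, List.foldl_nil, A_step_eq]
    have h0 : PySem.List.pyGetD gs ((0 : Nat) : Int) "" = gs.getD 0 "" := PySem.List.pyGetD_natCast gs 0 ""
    rw [h0, List.getD_eq_getElem gs "" hL]
    have htake : (gs.take 1).map (fun g => (g.toList.count c : Int)) = [(gs[0].toList.count c : Int)] := by
      rw [List.take_one]
      cases gs with
      | nil => simp at hL
      | cons a t => simp
    simp [htake]
  | succ L ih =>
    rw [List.range_succ, List.foldl_append, List.foldl_cons, List.foldl_nil]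
    rw [ih (by omega) (by omega) (by push_cast; ring)]
    rw [A_step_eq]
    have hpos : (0 : Int) < ((L + 1 : Nat) : Int) := by push_cast; omega
    rw [if_pos hpos]
    have htr : PySem.List.pyGetD travel (((L + 1 : Nat) : Int) - 1) 0 = travel[L] := by
      have h2 : (((L + 1 : Nat) : Int) - 1) = ((L : Nat) : Int) := by push_cast; ring
      rw [h2, PySem.List.pyGetD_natCast]
      exact List.getD_eq_getElem travel 0 (by omega)
    have hgg : PySem.List.pyGetD gs (((L + 1 : Nat) : Int)) "" = gs[L + 1] := by
      rw [PySem.List.pyGetD_natCast]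
      exact List.getD_eq_getElem gs "" (by omega)
    rw [htr, hgg]
    have hsum1 : (travel.take (L + 1)).sum = (travel.take L).sum + travel[L] :=
      List.sum_take_succ travel L (by omega)
    have hsum2 : ((gs.take (L + 1 + 1)).map (fun g => (g.toList.count c : Int))).sum
        = ((gs.take (L + 1)).map (fun g => (g.toList.count c : Int))).sum + (gs[L + 1].toList.count c : Int) := by
      rw [List.map_take, List.map_take]
      rw [List.sum_take_succ (gs.map (fun g => (g.toList.count c : Int))) (L + 1) (by simp [hL])]
      congr 1
      simp
    rw [hsum1, hsum2]
    ring

-- the truncated count up to the last occurrence is the full count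
theorem cntTake_eq_cntC (gs : List String) (c : Char) :
    ((gs.take ((gpmLast gs c).toNat + 1)).map (fun g => (g.toList.count c : Int))).sum = cntC gs c := by
  unfold cntC
  conv_rhs => rw [← List.take_append_drop ((gpmLast gs c).toNat + 1) gs]
  rw [List.map_append, List.sum_append]
  have hzero : ((gs.drop ((gpmLast gs c).toNat + 1)).map (fun g => (g.toList.count c : Int))).sum = 0 := by
    apply List.sum_eq_zero
    intro x hx
    obtain ⟨g, hg, rfl⟩ := List.mem_map.mp hx
    have := gpmLast_drop gs c g hg
    simp only [List.contains_eq_mem, decide_eq_false_iff_not] at this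
    simp [List.count_eq_zero.mpr this]
  rw [hzero]
  ring

-- closed form for one iteration of A's second loop
theorem A_item (gs : List String) (travel : List Int) (c : Char) (t : Int)
    (hc : c ∈ gcItemsA) (hpre : Pre_garbageCollection_SLOW gs travel) :
    aItemTime gs travel t c
    = t + cntC gs c + (if 0 ≤ gpmLast gs c then (travel.take (gpmLast gs c).toNat).sum else 0) := by
  unfold aItemTime
  rw [A_phase1 gs c hc]
  have hge := neg_one_le_gpmLast gs c
  by_cases h : gpmLast gs c = -1
  · rw [if_pos h, cntC_eq_zero gs c h, if_neg (by omega)]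
    ring
  · rw [if_neg h, if_pos (by omega : 0 ≤ gpmLast gs c)]
    have h0 : 0 ≤ gpmLast gs c := by omega
    obtain ⟨hlt, hmem⟩ := gpmLast_mem gs c h0
    have hT : (gpmLast gs c).toNat ≤ travel.length := by
      apply hpre _ (List.mem_range.mpr hlt)
      rw [List.getD_eq_getElem gs "" hlt]
      simp only [gcItemsA, List.mem_cons, List.not_mem_nil, or_false] at hc
      rcases hc with rfl | rfl | rfl
      · exact Or.inl hmem
      · exact Or.inr (Or.inl hmem)
      · exact Or.inr (Or.inr hmem)
    have hcast : gpmLast gs c = (((gpmLast gs c).toNat : Nat) : Int) := by omega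
    rw [hcast]
    rw [A_range gs travel c (gpmLast gs c).toNat t hlt hT]
    rw [show (((gpmLast gs c).toNat : Nat) : Int).toNat = (gpmLast gs c).toNat from by omega]
    rw [cntTake_eq_cntC]
    ring

-- ---------- B side ----------

theorem B_inner (cs : List Char) (st : Int × PySem.Dict Char Int) (i : Int)
    (hcont : ∀ ch, st.2.contains ch = decide (ch ∈ (['G', 'P', 'M'] : List Char))) :
    (∀ ch, (cs.foldl (bCharStep i) st).2.contains ch = decide (ch ∈ (['G', 'P', 'M'] : List Char))) ∧
    (cs.foldl (bCharStep i) st).1 = st.1 + (cs.countP (fun ch => decide (ch ∈ (['G', 'P', 'M'] : List Char))) : Int) ∧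
    ∀ c ∈ (['G', 'P', 'M'] : List Char),
      (cs.foldl (bCharStep i) st).2.getD c (-1) = if c ∈ cs then i else st.2.getD c (-1) := by
  induction cs generalizing st with
  | nil => simp [hcont]
  | cons ch t ih =>
    simp only [List.foldl_cons]
    by_cases hmem : ch ∈ (['G', 'P', 'M'] : List Char)
    · have hcond : st.2.contains ch = true := by rw [hcont]; simp [hmem]
      have hstep : bCharStep i st ch = (st.1 + 1, st.2.insert ch i) := by
        unfold bCharStep; rw [hcond]; simp
      rw [hstep]
      set st' : Int × PySem.Dict Char Int := (st.1 + 1, st.2.insert ch i) with hst'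
      have hcont' : ∀ ch', st'.2.contains ch' = decide (ch' ∈ (['G', 'P', 'M'] : List Char)) := by
        intro ch'
        rw [hst']
        show (st.2.insert ch i).contains ch' = decide (ch' ∈ (['G', 'P', 'M'] : List Char))
        rw [PySem.Dict.contains_insert, hcont]
        by_cases h : ch' = ch
        · subst h; simp [hmem]
        · simp [h]
      obtain ⟨ih1, ih2, ih3⟩ := ih st' hcont'
      refine ⟨ih1, ?_, ?_⟩
      · rw [ih2, hst']
        simp only [List.countP_cons]
        simp [hmem]
        push_cast
        ring
      · intro c hcB
        rw [ih3 c hcB]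
        by_cases hct : c ∈ t
        · simp [hct]
        · simp only [hct, if_false, List.mem_cons, or_false]
          by_cases hcch : c = ch
          · subst hcch
            simp [hst', PySem.Dict.getD_insert_self]
          · simp only [hcch, if_false, hst']
            simp [hcch, PySem.Dict.getD_insert_of_ne st.2 i (-1) hcch]
    · have hcond : st.2.contains ch = false := by rw [hcont]; simp [hmem]
      have hstep : bCharStep i st ch = st := by
        unfold bCharStep; rw [hcond]; simp
      rw [hstep]
      obtain ⟨ih1, ih2, ih3⟩ := ih st hcont
      refine ⟨ih1, ?_, ?_⟩
      · rw [ih2]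
        simp only [List.countP_cons]
        simp [hmem]
      · intro c hcB
        rw [ih3 c hcB]
        have hne : c ≠ ch := fun h => hmem (h ▸ hcB)
        simp [hne]

theorem B_scan (gs : List String) :
    (∀ ch, (bScan gs).2.contains ch = decide (ch ∈ (['G', 'P', 'M'] : List Char))) ∧
    (bScan gs).1 = (gs.map (fun g => (g.toList.countP (fun ch => decide (ch ∈ (['G', 'P', 'M'] : List Char))) : Int))).sum ∧
    ∀ c ∈ (['G', 'P', 'M'] : List Char), (bScan gs).2.getD c (-1) = gpmLast gs c := by
  induction gs using List.reverseRecOn with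
  | nil =>
    refine ⟨?_, ?_, ?_⟩
    · intro ch
      show (PySem.Dict.ofList [('G', (-1 : Int)), ('P', -1), ('M', -1)]).contains ch = decide (ch ∈ (['G', 'P', 'M'] : List Char))
      rw [PySem.Dict.contains_eq_decide_mem_keys]
      rw [show (PySem.Dict.ofList [('G', (-1 : Int)), ('P', -1), ('M', -1)]).keys = ['G', 'P', 'M'] from by decide]
    · simp [bScan, PySem.List.enumerate]
    · intro c hc
      show (PySem.Dict.ofList [('G', (-1 : Int)), ('P', -1), ('M', -1)]).getD c (-1) = gpmLast [] c
      fin_cases hc <;> rfl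
  | append_singleton gs g ih =>
    obtain ⟨ih1, ih2, ih3⟩ := ih
    have hunf : bScan (gs ++ [g]) = bHouseStep (bScan gs) (((gs.length : Int)), g) := by
      unfold bScan
      rw [PySem.List.enumerate_append, List.foldl_append]
      simp [PySem.List.enumerate]
    rw [hunf]
    unfold bHouseStep
    obtain ⟨b1, b2, b3⟩ := B_inner g.toList (bScan gs) (gs.length : Int) ih1
    refine ⟨b1, ?_, ?_⟩
    · rw [b2, ih2]
      simp only [List.map_append, List.sum_append, List.map_cons, List.map_nil, List.sum_cons,
        List.sum_nil]
      ring
    · intro c hc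
      rw [b3 c hc, ih3 c hc, gpmLast_snoc]
      by_cases h : c ∈ g.toList
      · rw [if_pos h, if_pos (by simpa [List.contains_eq_mem] using h)]
      · rw [if_neg h, if_neg (by simpa [List.contains_eq_mem] using h)]

-- per-string: counting G/P/M together is the three separate counts
theorem countP_gpm (cs : List Char) :
    cs.countP (fun ch => decide (ch ∈ (['G', 'P', 'M'] : List Char))) = cs.count 'G' + cs.count 'P' + cs.count 'M' := by
  induction cs with
  | nil => simp
  | cons a t ih =>
    simp only [List.countP_cons, List.count_cons, List.mem_cons, List.not_mem_nil,
      or_false] at *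
    by_cases h1 : a = 'G' <;> by_cases h2 : a = 'P' <;> by_cases h3 : a = 'M' <;>
      simp_all <;> omega

theorem pick_eq (gs : List String) :
    (gs.map (fun g => (g.toList.countP (fun ch => decide (ch ∈ (['G', 'P', 'M'] : List Char))) : Int))).sum
    = cntC gs 'G' + cntC gs 'P' + cntC gs 'M' := by
  induction gs with
  | nil => simp [cntC]
  | cons g t ih =>
    simp only [List.map_cons, List.sum_cons, cntC] at *
    rw [ih, countP_gpm]
    push_cast
    ring

-- B's guarded slice sum, as a plain addition
theorem slice_if (travel : List Int) (L t : Int) :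
    (if 0 ≤ L then t + (PySem.List.slice travel none (some L)).sum else t)
    = t + (if 0 ≤ L then (travel.take L.toNat).sum else 0) := by
  by_cases h : 0 ≤ L
  · rw [if_pos h, if_pos h, PySem.List.slice_to travel h]
  · rw [if_neg h, if_neg h]; ring

-- ---------- assembly ----------

theorem garbageCollection_SLOW_spec : Claim_equal_garbageCollection_SLOW := by
  intro gs travel _hdom hpre
  unfold Spec_garbageCollection_SLOW
  unfold garbageCollection_SLOW garbageCollection_SLOW_alt
  obtain ⟨-, h2, h3⟩ := B_scan gs
  simp only [gcItemsA, List.foldl_cons, List.foldl_nil]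
  rw [A_item gs travel 'G' _ (by decide) hpre,
      A_item gs travel 'P' _ (by decide) hpre,
      A_item gs travel 'M' _ (by decide) hpre]
  rw [h3 'G' (by decide), h3 'P' (by decide), h3 'M' (by decide), h2, pick_eq]
  rw [slice_if travel (gpmLast gs 'G'), slice_if travel (gpmLast gs 'P'),
      slice_if travel (gpmLast gs 'M')]
  ring
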